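-- pv_equiv track=rewrite | github.com/DSGAMING98/crop_fertilizer_suggester | src/photo_recommender.py | _crop_group
-- ===== SOURCE A (Python) =====
-- def _crop_group(crop: str) -> str:
--     c = (crop or "").strip().lower()
--
--     cereals = ["rice", "wheat", "maize", "corn", "barley", "sorghum", "millet", "ragi"]
--     pulses = ["gram", "chickpea", "lentil", "pea", "pigeon", "moong", "urad", "beans", "soy", "soybean"]
--     oilseeds = ["groundnut", "peanut", "mustard", "sunflower", "sesame", "til", "castor"]
--     cash = ["cotton", "sugarcane"]
--     veggies = ["tomato", "potato", "onion", "chilli", "brinjal", "eggplant", "cabbage", "cauliflower", "okra"]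
--
--     if any(x in c for x in cereals):
--         return "cereal"
--     if any(x in c for x in pulses):
--         return "pulse"
--     if any(x in c for x in oilseeds):
--         return "oilseed"
--     if any(x in c for x in cash):
--         return "cash_crop"
--     if any(x in c for x in veggies):
--         return "vegetable"
--     return "general"
-- ===== SOURCE B (Python) =====
-- _CATS = ["cereal", "pulse", "oilseed", "cash_crop", "vegetable", "general"]
--
-- _KEYWORDS = [
--     ("rice", 0), ("wheat", 0), ("maize", 0), ("corn", 0), ("barley", 0),
--     ("sorghum", 0), ("millet", 0), ("ragi", 0),
--     ("gram", 1), ("chickpea", 1), ("lentil", 1), ("pea", 1), ("pigeon", 1),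
--     ("moong", 1), ("urad", 1), ("beans", 1), ("soy", 1), ("soybean", 1),
--     ("groundnut", 2), ("peanut", 2), ("mustard", 2), ("sunflower", 2),
--     ("sesame", 2), ("til", 2), ("castor", 2),
--     ("cotton", 3), ("sugarcane", 3),
--     ("tomato", 4), ("potato", 4), ("onion", 4), ("chilli", 4),
--     ("brinjal", 4), ("eggplant", 4), ("cabbage", 4), ("cauliflower", 4), ("okra", 4),
-- ]
--
--
-- def _crop_group(crop: str) -> str:
--     # Single left-to-right sweep over the text: at each position test which
--     # keywords start there and keep the best (lowest) category priority seen.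
--     c = (crop or "").strip().lower()
--     best = 5
--     for i in range(len(c)):
--         tail = c[i:]
--         for kw, pri in _KEYWORDS:
--             if pri < best and tail.startswith(kw):
--                 best = pri
--     return _CATS[best]
-- ===== Notes on version B (the rewrite author's own statement) =====
-- stated objective: alternative
-- what changed: Instead of five any()-substring scans tried category by category, B makes one left-to-right sweep over the normalized text, testing at each position which keywords start there and maintaining a min-priority accumulator, then maps the final priority to its category name.
import Mathlib
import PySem

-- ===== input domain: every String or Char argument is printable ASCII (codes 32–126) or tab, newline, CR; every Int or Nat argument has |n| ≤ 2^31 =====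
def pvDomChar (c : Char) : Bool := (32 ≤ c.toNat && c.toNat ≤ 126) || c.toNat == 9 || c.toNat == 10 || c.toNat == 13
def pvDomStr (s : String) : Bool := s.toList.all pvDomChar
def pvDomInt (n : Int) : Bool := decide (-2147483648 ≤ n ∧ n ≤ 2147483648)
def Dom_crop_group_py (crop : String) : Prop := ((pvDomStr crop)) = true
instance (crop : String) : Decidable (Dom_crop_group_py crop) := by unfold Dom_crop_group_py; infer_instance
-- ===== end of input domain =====

set_option maxRecDepth 8192
set_option maxHeartbeats 1000000


-- B replaces A's five category-by-category any()-substring scans with one left-to-right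
-- sweep over the text keeping a min-priority accumulator (objective: alternative).

-- ===== PORT A =====
def crop_group_py (crop : String) : String :=
  -- c = (crop or "").strip().lower()   ('crop or ""' is crop itself when non-empty, "" otherwise)
  let c := PySem.Str.lower (PySem.Str.strip (if crop == "" then "" else crop))
  let cereals := ["rice", "wheat", "maize", "corn", "barley", "sorghum", "millet", "ragi"]
  let pulses := ["gram", "chickpea", "lentil", "pea", "pigeon", "moong", "urad", "beans", "soy", "soybean"]
  let oilseeds := ["groundnut", "peanut", "mustard", "sunflower", "sesame", "til", "castor"]
  let cash := ["cotton", "sugarcane"]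
  let veggies := ["tomato", "potato", "onion", "chilli", "brinjal", "eggplant", "cabbage", "cauliflower", "okra"]
  if cereals.any (fun x => PySem.Str.isIn x c) then "cereal"
  else if pulses.any (fun x => PySem.Str.isIn x c) then "pulse"
  else if oilseeds.any (fun x => PySem.Str.isIn x c) then "oilseed"
  else if cash.any (fun x => PySem.Str.isIn x c) then "cash_crop"
  else if veggies.any (fun x => PySem.Str.isIn x c) then "vegetable"
  else "general"

-- ===== PORT B =====
-- Source B's _KEYWORDS table: every keyword with its category priority.
def kwTable : List (String × Nat) :=
  [("rice", 0), ("wheat", 0), ("maize", 0), ("corn", 0), ("barley", 0),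
   ("sorghum", 0), ("millet", 0), ("ragi", 0),
   ("gram", 1), ("chickpea", 1), ("lentil", 1), ("pea", 1), ("pigeon", 1),
   ("moong", 1), ("urad", 1), ("beans", 1), ("soy", 1), ("soybean", 1),
   ("groundnut", 2), ("peanut", 2), ("mustard", 2), ("sunflower", 2),
   ("sesame", 2), ("til", 2), ("castor", 2),
   ("cotton", 3), ("sugarcane", 3),
   ("tomato", 4), ("potato", 4), ("onion", 4), ("chilli", 4),
   ("brinjal", 4), ("eggplant", 4), ("cabbage", 4), ("cauliflower", 4), ("okra", 4)]

-- Source B's _CATS.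
def catNames : List String := ["cereal", "pulse", "oilseed", "cash_crop", "vegetable", "general"]

-- inner loop body: 'if pri < best and tail.startswith(kw): best = pri'
def stepK (tail : List Char) (b : Nat) (q : String × Nat) : Nat :=
  if q.2 < b ∧ PySem.Chars.startswith tail q.1.toList then q.2 else b

-- outer loop body for position i: tail = c[i:] (0 ≤ i < len(c), so the slice is List.drop i),
-- then the inner for-loop over _KEYWORDS.
def outerStep (c : List Char) (b : Nat) (i : Nat) : Nat :=
  kwTable.foldl (stepK (c.drop i)) b

def crop_group_py_alt (crop : String) : String :=
  let c := (PySem.Str.lower (PySem.Str.strip (if crop == "" then "" else crop))).toList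
  -- for i in range(len(c)): … (range(len(c)) enumerates 0,…,len-1 = List.range)
  let best := (List.range c.length).foldl (outerStep c) 5
  -- _CATS[best]: best ≤ 5 always (foldl never increases the accumulator), so Python's
  -- in-range indexing is exactly List.getD here.
  catNames.getD best "general"

-- ===== PRECONDITION & SPEC =====
def Spec_crop_group_py (crop : String) (out : String) : Prop := out = crop_group_py_alt crop
instance (crop : String) (out : String) : Decidable (Spec_crop_group_py crop out) := by unfold Spec_crop_group_py; infer_instance

-- ===== CLAIM (what is proved, stated in full; the proofs are below) =====
def Claim_equal_crop_group_py : Prop := ∀ (crop : String), Dom_crop_group_py crop → Spec_crop_group_py crop (crop_group_py crop)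

-- ===== LEMMAS AND PROOFS =====

/-- 'some keyword of priority p occurs in c' (the content of A's p-th any()-scan). -/
def hitB (p : Nat) (c : List Char) : Bool :=
  kwTable.any (fun q => q.2 == p && PySem.Chars.isIn q.1.toList c)

theorem stepK_le (tail : List Char) (b : Nat) (q : String × Nat) : stepK tail b q ≤ b := by
  unfold stepK; split
  · omega
  · exact le_rfl

theorem foldl_stepK_le (tail : List Char) (t : List (String × Nat)) (b : Nat) :
    t.foldl (stepK tail) b ≤ b := by
  induction t generalizing b with
  | nil => exact le_rfl
  | cons q rest ih => exact le_trans (ih (stepK tail b q)) (stepK_le tail b q)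

theorem foldl_outer_le (c : List Char) (l : List Nat) (b : Nat) :
    l.foldl (outerStep c) b ≤ b := by
  induction l generalizing b with
  | nil => exact le_rfl
  | cons i rest ih =>
    have h1 : outerStep c b i ≤ b := by
      unfold outerStep; exact foldl_stepK_le (c.drop i) kwTable b
    rw [List.foldl_cons]
    exact le_trans (ih (outerStep c b i)) h1

/-- inner completeness: a matching table entry caps the inner fold's result by its priority. -/
theorem foldl_stepK_complete (tail : List Char) (t : List (String × Nat)) (kw : String) (p : Nat)
    (hmem : (kw, p) ∈ t) (hsw : PySem.Chars.startswith tail kw.toList = true) (b : Nat) :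
    t.foldl (stepK tail) b ≤ p := by
  induction t generalizing b with
  | nil => cases hmem
  | cons q rest ih =>
    rcases List.mem_cons.mp hmem with hq | hq
    · subst hq
      have h2 : stepK tail b (kw, p) ≤ p := by
        unfold stepK; simp [hsw]; split <;> omega
      exact le_trans (foldl_stepK_le tail rest _) h2
    · exact ih hq _

/-- outer completeness: a keyword matching at a visited position caps the result. -/
theorem foldl_outer_complete (c : List Char) (l : List Nat) (j : Nat) (kw : String) (p : Nat)
    (hj : j ∈ l) (hmem : (kw, p) ∈ kwTable)
    (hsw : PySem.Chars.startswith (c.drop j) kw.toList = true) (b : Nat) :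
    l.foldl (outerStep c) b ≤ p := by
  induction l generalizing b with
  | nil => cases hj
  | cons i rest ih =>
    rcases List.mem_cons.mp hj with hi | hi
    · subst hi
      have h2 : outerStep c b j ≤ p := by
        unfold outerStep; exact foldl_stepK_complete (c.drop j) kwTable kw p hmem hsw b
      rw [List.foldl_cons]
      exact le_trans (foldl_outer_le c rest _) h2
    · rw [List.foldl_cons]; exact ih hi _

/-- inner soundness: the inner fold returns its input or a matched entry's priority. -/
theorem foldl_stepK_sound (tail : List Char) (t : List (String × Nat)) (b : Nat) :
    t.foldl (stepK tail) b = b ∨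
      ∃ q ∈ t, PySem.Chars.startswith tail q.1.toList = true ∧ t.foldl (stepK tail) b = q.2 := by
  induction t generalizing b with
  | nil => exact Or.inl rfl
  | cons q rest ih =>
    simp only [List.foldl_cons]
    rcases ih (stepK tail b q) with h | ⟨q', hq', hsw, hval⟩
    · by_cases hc : q.2 < b ∧ PySem.Chars.startswith tail q.1.toList = true
      · refine Or.inr ⟨q, List.mem_cons_self .., hc.2, ?_⟩
        rw [h]; unfold stepK; rw [if_pos hc]
      · left; rw [h]; unfold stepK; rw [if_neg hc]
    · exact Or.inr ⟨q', List.mem_cons_of_mem _ hq', hsw, hval⟩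

/-- outer soundness. -/
theorem foldl_outer_sound (c : List Char) (l : List Nat) (b : Nat) :
    l.foldl (outerStep c) b = b ∨
      ∃ j ∈ l, ∃ q ∈ kwTable, PySem.Chars.startswith (c.drop j) q.1.toList = true ∧
        l.foldl (outerStep c) b = q.2 := by
  induction l generalizing b with
  | nil => exact Or.inl rfl
  | cons i rest ih =>
    simp only [List.foldl_cons]
    have hsound : outerStep c b i = kwTable.foldl (stepK (c.drop i)) b := by
      unfold outerStep
      rfl
    rcases ih (outerStep c b i) with h | ⟨j, hj, q, hq, hsw, hval⟩
    · rcases foldl_stepK_sound (c.drop i) kwTable b with h2 | ⟨q, hq, hsw, hval⟩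
      · left; rw [h, hsound]; exact h2
      · refine Or.inr ⟨i, List.mem_cons_self .., q, hq, hsw, ?_⟩
        rw [h, hsound]; exact hval
    · exact Or.inr ⟨j, List.mem_cons_of_mem _ hj, q, hq, hsw, hval⟩

theorem kwTable_nonempty_kw : ∀ q ∈ kwTable, q.1.toList ≠ [] := by decide

/-- 'kw in c' ⇔ kw starts at some position 0 ≤ j < len c (for the nonempty keywords of the table). -/
theorem isIn_iff_range (kw c : List Char) (hkw : kw ≠ []) :
    PySem.Chars.isIn kw c = true ↔
      ∃ j ∈ List.range c.length, PySem.Chars.startswith (c.drop j) kw = true := by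
  constructor
  · intro h
    obtain ⟨j, hj⟩ := (PySem.Chars.exists_prefix_drop_iff_isIn kw c).mpr h
    have hjlt : j < c.length := by
      by_contra hge
      rw [List.drop_eq_nil_of_le (by omega)] at hj
      exact hkw (List.prefix_nil.mp hj)
    exact ⟨j, List.mem_range.mpr hjlt, (PySem.Chars.startswith_iff _ _).mpr hj⟩
  · rintro ⟨j, _, hsw⟩
    exact (PySem.Chars.exists_prefix_drop_iff_isIn kw c).mp
      ⟨j, (PySem.Chars.startswith_iff _ _).mp hsw⟩

/-- completeness at the top level: a hit of priority p caps B's result. -/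
theorem best_le_of_hit (c : List Char) (p : Nat) (h : hitB p c = true) :
    (List.range c.length).foldl (outerStep c) 5 ≤ p := by
  obtain ⟨q, hq, hval⟩ := List.any_eq_true.mp h
  simp only [Bool.and_eq_true] at hval
  obtain ⟨hp, hin⟩ := hval
  obtain ⟨j, hj, hsw⟩ := (isIn_iff_range q.1.toList c (kwTable_nonempty_kw q hq)).mp hin
  have hp' : q.2 = p := by simpa using hp
  subst hp'
  exact foldl_outer_complete c _ j q.1 q.2 hj (by simpa using hq) hsw 5

/-- soundness at the top level: a result ≠ 5 is the priority of some hit. -/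
theorem hit_of_best_ne (c : List Char)
    (h : (List.range c.length).foldl (outerStep c) 5 ≠ 5) :
    hitB ((List.range c.length).foldl (outerStep c) 5) c = true := by
  rcases foldl_outer_sound c (List.range c.length) 5 with h5 | ⟨j, hj, q, hq, hsw, hval⟩
  · exact absurd h5 h
  · refine List.any_eq_true.mpr ⟨q, hq, ?_⟩
    have hin : PySem.Chars.isIn q.1.toList c = true :=
      (isIn_iff_range q.1.toList c (kwTable_nonempty_kw q hq)).mpr ⟨j, hj, hsw⟩
    simp [hval, hin]

/-- B's accumulator ends at exactly the least priority that is hit (5 if none). -/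
theorem best_val (c : List Char) (k : Nat) (hk : k ≤ 5)
    (hlt : ∀ p < k, hitB p c = false) (hk2 : k = 5 ∨ hitB k c = true) :
    (List.range c.length).foldl (outerStep c) 5 = k := by
  set r := (List.range c.length).foldl (outerStep c) 5 with hr
  have hle5 : r ≤ 5 := foldl_outer_le c _ 5
  rcases hk2 with h5 | hhit
  · subst h5
    by_contra hne
    have := hlt r (by omega) ▸ hit_of_best_ne c hne
    simp at this
  · have hle : r ≤ k := best_le_of_hit c k hhit
    by_contra hne
    have hrk : r < k := by omega
    have hne5 : r ≠ 5 := by omega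
    have := hlt r hrk ▸ hit_of_best_ne c hne5
    simp at this

-- ===== VERDICT (by name: the statement is the Claim_ definition above) =====
theorem crop_group_py_spec : Claim_equal_crop_group_py := by
  intro crop _
  show crop_group_py crop = crop_group_py_alt crop
  unfold crop_group_py crop_group_py_alt
  set cs := PySem.Str.lower (PySem.Str.strip (if crop == "" then "" else crop)) with hcs
  set c := cs.toList with hc
  -- A's five any()-conditions are exactly hitB 0..4 on c
  have e0 : (["rice", "wheat", "maize", "corn", "barley", "sorghum", "millet", "ragi"].any
      (fun x => PySem.Str.isIn x cs)) = hitB 0 c := by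
    simp [hitB, kwTable, hc]
  have e1 : (["gram", "chickpea", "lentil", "pea", "pigeon", "moong", "urad", "beans", "soy", "soybean"].any
      (fun x => PySem.Str.isIn x cs)) = hitB 1 c := by
    simp [hitB, kwTable, hc]
  have e2 : (["groundnut", "peanut", "mustard", "sunflower", "sesame", "til", "castor"].any
      (fun x => PySem.Str.isIn x cs)) = hitB 2 c := by
    simp [hitB, kwTable, hc]
  have e3 : (["cotton", "sugarcane"].any (fun x => PySem.Str.isIn x cs)) = hitB 3 c := by
    simp [hitB, kwTable, hc]
  have e4 : (["tomato", "potato", "onion", "chilli", "brinjal", "eggplant", "cabbage", "cauliflower", "okra"].any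
      (fun x => PySem.Str.isIn x cs)) = hitB 4 c := by
    simp [hitB, kwTable, hc]
  simp only [e0, e1, e2, e3, e4]
  by_cases h0 : hitB 0 c = true
  · rw [best_val c 0 (by omega) (fun p hp => absurd hp (by omega)) (Or.inr h0)]
    simp [h0, catNames]
  · have h0' : hitB 0 c = false := by rwa [Bool.not_eq_true] at h0
    by_cases h1 : hitB 1 c = true
    · rw [best_val c 1 (by omega) (fun p hp => by match p with | 0 => exact h0' | n+1 => exact absurd hp (by omega)) (Or.inr h1)]
      simp [h0', h1, catNames]
    · have h1' : hitB 1 c = false := by rwa [Bool.not_eq_true] at h1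
      by_cases h2 : hitB 2 c = true
      · rw [best_val c 2 (by omega) (fun p hp => by match p with | 0 => exact h0' | 1 => exact h1' | n+2 => exact absurd hp (by omega)) (Or.inr h2)]
        simp [h0', h1', h2, catNames]
      · have h2' : hitB 2 c = false := by rwa [Bool.not_eq_true] at h2
        by_cases h3 : hitB 3 c = true
        · rw [best_val c 3 (by omega) (fun p hp => by match p with | 0 => exact h0' | 1 => exact h1' | 2 => exact h2' | n+3 => exact absurd hp (by omega)) (Or.inr h3)]
          simp [h0', h1', h2', h3, catNames]
        · have h3' : hitB 3 c = false := by rwa [Bool.not_eq_true] at h3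
          by_cases h4 : hitB 4 c = true
          · rw [best_val c 4 (by omega) (fun p hp => by match p with | 0 => exact h0' | 1 => exact h1' | 2 => exact h2' | 3 => exact h3' | n+4 => exact absurd hp (by omega)) (Or.inr h4)]
            simp [h0', h1', h2', h3', h4, catNames]
          · have h4' : hitB 4 c = false := by rwa [Bool.not_eq_true] at h4
            rw [best_val c 5 (by omega) (fun p hp => by match p with | 0 => exact h0' | 1 => exact h1' | 2 => exact h2' | 3 => exact h3' | 4 => exact h4' | n+5 => exact absurd hp (by omega)) (Or.inl rfl)]
            simp [h0', h1', h2', h3', h4', catNames]
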